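-- pv_equiv track=rewrite | github.com/abdelrahman-313/pytasks | task11/long_sorted_alpha.py | get_long_sorted_alpha
-- ===== SOURCE A (Python) =====
-- def get_long_sorted_alpha(word):
--     long_alpha = word[0]
--     compaired = word[0]
--     for w in word[1:]:
--         if ord(w) > ord(compaired):
--             long_alpha += w
--             compaired = w
--         else:
--             break
--     return long_alpha
-- ===== SOURCE B (Python) =====
-- def get_long_sorted_alpha(word):
--     cut = len(word)
--     for i in range(1, len(word)):
--         if ord(word[i]) <= ord(word[i - 1]):
--             cut = i
--             break
--     return word[:cut]
-- ===== Notes on version B (the rewrite author's own statement) =====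
-- stated objective: simpler
-- what changed: B finds the cut index of the first non-increase and returns one slice word[:cut], instead of A's growing an accumulator string character by character with a tracked previous character.
-- outside the precondition, e.g. on get_long_sorted_alpha(''): A raises IndexError, B returns ''
-- crash fix: On the empty string A raises IndexError (it reads word[0] first); B returns '' since its slice of an empty string is empty. — e.g. on get_long_sorted_alpha(""): A raises IndexError, B returns ""
import Mathlib
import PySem

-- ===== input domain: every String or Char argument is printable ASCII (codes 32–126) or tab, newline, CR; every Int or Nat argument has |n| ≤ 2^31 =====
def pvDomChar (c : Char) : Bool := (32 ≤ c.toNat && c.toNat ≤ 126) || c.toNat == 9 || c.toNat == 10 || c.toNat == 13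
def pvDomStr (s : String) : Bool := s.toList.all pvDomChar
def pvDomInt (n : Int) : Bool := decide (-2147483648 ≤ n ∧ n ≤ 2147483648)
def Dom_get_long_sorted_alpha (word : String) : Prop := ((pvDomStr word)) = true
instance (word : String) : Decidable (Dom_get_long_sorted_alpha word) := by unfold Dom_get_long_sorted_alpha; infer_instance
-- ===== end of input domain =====

-- B replaces A's accumulator-string loop by finding the cut index of the first
-- non-increase and returning a single slice (simpler decomposition, same cost).
-- On the empty string A raises IndexError; B returns "" (see Raises_ block).

-- ===== PORT A =====
-- A's loop over word[1:]: accumulate while ord strictly increases, break otherwise.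
def pvGoA : List Char → List Char → Char → List Char
  | [], la, _ => la
  | w :: ws, la, comp =>
    if w.toNat > comp.toNat then pvGoA ws (la ++ [w]) w else la

def get_long_sorted_alpha (word : String) : String :=
  match word.toList with
  | [] => ""          -- A raises IndexError here (word[0]); excluded by Pre_
  | c :: rest => String.mk (pvGoA rest [c] c)

-- ===== PORT B =====
-- B's loop: i from 1, break at first word[i] <= word[i-1], cut defaults to len(word).
def pvGoB : List Char → Char → Nat → Nat → Nat
  | [], _, _, n => n
  | c :: cs, prev, i, n =>
    if c.toNat ≤ prev.toNat then i else pvGoB cs c (i + 1) n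

def get_long_sorted_alpha_alt (word : String) : String :=
  let cs := word.toList
  let cut : Nat :=
    match cs with
    | [] => cs.length
    | c :: rest => pvGoB rest c 1 cs.length
  String.mk (cs.take cut)   -- word[:cut], 0 ≤ cut ≤ len

-- ===== PRECONDITION & SPEC =====
-- A reads word[0] before the loop, so it raises IndexError on the empty string.
def Pre_get_long_sorted_alpha (word : String) : Prop := word ≠ ""
instance (word : String) : Decidable (Pre_get_long_sorted_alpha word) := by
  unfold Pre_get_long_sorted_alpha; infer_instance

def pvWitness_get_long_sorted_alpha : String := "abc"

-- On the empty string A raises IndexError while B returns "".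
def Raises_get_long_sorted_alpha (word : String) : Prop := word = ""
instance (word : String) : Decidable (Raises_get_long_sorted_alpha word) := by
  unfold Raises_get_long_sorted_alpha; infer_instance
def pvRaiseWitness_get_long_sorted_alpha : String := ""
def pvRaiseWitnessOut_get_long_sorted_alpha : String := ""

def Spec_get_long_sorted_alpha (word : String) (out : String) : Prop :=
  out = get_long_sorted_alpha_alt word
instance (word : String) (out : String) : Decidable (Spec_get_long_sorted_alpha word out) := by
  unfold Spec_get_long_sorted_alpha; infer_instance

-- ===== CLAIM (what is proved, stated in full; the proofs are below) =====
def Claim_equal_get_long_sorted_alpha : Prop :=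
  ∀ (word : String), Dom_get_long_sorted_alpha word → Pre_get_long_sorted_alpha word →
    Spec_get_long_sorted_alpha word (get_long_sorted_alpha word)

def Claim_raises_get_long_sorted_alpha : Prop :=
  (∀ (word : String), Dom_get_long_sorted_alpha word → Raises_get_long_sorted_alpha word →
      ¬ Pre_get_long_sorted_alpha word) ∧
  (Dom_get_long_sorted_alpha (pvRaiseWitness_get_long_sorted_alpha) ∧
   Raises_get_long_sorted_alpha (pvRaiseWitness_get_long_sorted_alpha) ∧
   get_long_sorted_alpha_alt (pvRaiseWitness_get_long_sorted_alpha) = pvRaiseWitnessOut_get_long_sorted_alpha)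

-- ===== LEMMAS AND PROOFS =====
-- length of the strictly increasing run, the common characterisation
def pvIncLen : List Char → Char → Nat
  | [], _ => 0
  | c :: cs, prev => if c.toNat > prev.toNat then pvIncLen cs c + 1 else 0

theorem pvGoA_eq (l : List Char) : ∀ (acc : List Char) (prev : Char),
    pvGoA l acc prev = acc ++ l.take (pvIncLen l prev) := by
  induction l with
  | nil => intro acc prev; simp [pvGoA, pvIncLen]
  | cons c cs ih =>
    intro acc prev
    by_cases h : c.toNat > prev.toNat
    · simp [pvGoA, pvIncLen, h, ih]
    · simp [pvGoA, pvIncLen, h]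

theorem pvGoB_eq (l : List Char) : ∀ (prev : Char) (i : Nat),
    pvGoB l prev i (i + l.length) = i + pvIncLen l prev := by
  induction l with
  | nil => intro prev i; simp [pvGoB, pvIncLen]
  | cons c cs ih =>
    intro prev i
    by_cases h : c.toNat ≤ prev.toNat
    · have h' : ¬ c.toNat > prev.toNat := by omega
      simp [pvGoB, pvIncLen, h, h']
    · have h' : c.toNat > prev.toNat := by omega
      have := ih c (i + 1)
      simp [pvGoB, pvIncLen, h, h', List.length_cons]
      calc pvGoB cs c (i + 1) (i + (cs.length + 1))
          = pvGoB cs c (i + 1) ((i + 1) + cs.length) := by ring_nf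
        _ = (i + 1) + pvIncLen cs c := ih c (i + 1)
        _ = i + (pvIncLen cs c + 1) := by omega

-- ===== VERDICT (by name: the statement is the Claim_ definition above) =====
theorem get_long_sorted_alpha_spec : Claim_equal_get_long_sorted_alpha := by
  intro word _ hpre
  unfold Spec_get_long_sorted_alpha get_long_sorted_alpha get_long_sorted_alpha_alt
  cases hl : word.toList with
  | nil =>
    exact absurd (by simpa [String.toList_eq_nil_iff] using hl) hpre
  | cons c rest =>
    have hB : pvGoB rest c 1 (rest.length + 1) = pvIncLen rest c + 1 := by
      have := pvGoB_eq rest c 1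
      simpa [Nat.add_comm] using this
    simp [pvGoA_eq]
    rw [hB, List.take_succ_cons]

theorem get_long_sorted_alpha_raises : Claim_raises_get_long_sorted_alpha := by
  unfold Claim_raises_get_long_sorted_alpha
  refine ⟨?_, by decide⟩
  intro word _ hr
  simp only [Raises_get_long_sorted_alpha] at hr
  simp [Pre_get_long_sorted_alpha, hr]

-- self-check: B's port indeed returns the stated literal at the raise witness
theorem pvRaiseWitnessOut_get_long_sorted_alpha_ok :
    get_long_sorted_alpha_alt pvRaiseWitness_get_long_sorted_alpha = pvRaiseWitnessOut_get_long_sorted_alpha :=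
  get_long_sorted_alpha_raises.2.2.2
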